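-- pv_equiv track=rewrite | github.com/adb262/Pokemon | src/data/labeling/video_labeler.py | set_to_intervals
-- ===== SOURCE A (Python) =====
-- def set_to_intervals(frame_set: set[int]) -> list[list[int]]:
--     """Convert a set of frame indices to sorted list of [start, end] intervals."""
--     if not frame_set:
--         return []
--
--     sorted_frames = sorted(frame_set)
--     intervals = []
--     start = sorted_frames[0]
--     end = sorted_frames[0]
--
--     for frame in sorted_frames[1:]:
--         if frame == end + 1:
--             end = frame
--         else:
--             intervals.append([start, end])
--             start = frame
--             end = frame
--
--     intervals.append([start, end])
--     return intervals
-- ===== SOURCE B (Python) =====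
-- def set_to_intervals(frame_set):
--     """Convert a set of frame indices to sorted list of [start, end] intervals.
--
--     Group-key decomposition: after sorting, frame - position is constant exactly
--     on a run of consecutive integers, so grouping by that key yields the intervals.
--     """
--     groups = {}
--     for i, f in enumerate(sorted(frame_set)):
--         groups.setdefault(f - i, []).append(f)
--     return [[g[0], g[-1]] for g in groups.values()]
-- ===== Notes on version B (the rewrite author's own statement) =====
-- stated objective: idiomatic
-- what changed: Replaces A's explicit start/end state machine over the sorted frames by a group-key decomposition: group the sorted frames by the constant key frame - index (constant exactly on a run of consecutive integers) and emit [first, last] of each group.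
import Mathlib
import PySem

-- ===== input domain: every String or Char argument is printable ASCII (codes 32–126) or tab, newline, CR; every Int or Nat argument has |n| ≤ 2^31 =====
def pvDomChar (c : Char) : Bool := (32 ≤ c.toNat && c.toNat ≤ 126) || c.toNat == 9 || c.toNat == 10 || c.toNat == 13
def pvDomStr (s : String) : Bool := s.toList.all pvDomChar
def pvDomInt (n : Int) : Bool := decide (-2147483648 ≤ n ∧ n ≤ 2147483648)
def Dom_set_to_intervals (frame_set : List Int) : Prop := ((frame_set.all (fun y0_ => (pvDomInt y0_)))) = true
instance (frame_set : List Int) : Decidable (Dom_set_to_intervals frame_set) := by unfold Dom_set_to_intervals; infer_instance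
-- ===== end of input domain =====

-- B replaces A's start/end state machine by grouping the sorted frames on the key frame - index
-- (constant exactly on a run of consecutive integers); same return value on every set of frames.

-- ===== PORT A =====
-- the 'for frame in sorted_frames[1:]' loop with state (intervals, start, end)
def pvALoop (intervals : List (List Int)) (start e : Int) : List Int → List (List Int)
  | [] => intervals ++ [[start, e]]
  | f :: rest =>
    if f = e + 1 then pvALoop intervals start f rest
    else pvALoop (intervals ++ [[start, e]]) f f rest

def set_to_intervals (frame_set : List Int) : List (List Int) :=
  if frame_set = [] then []
  else
    match PySem.List.sorted frame_set (fun x => x) false with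
    | [] => []  -- unreachable: sorted of a nonempty list is nonempty
    | f0 :: rest => pvALoop [] f0 f0 rest

-- ===== PORT B =====
-- loop body: groups.setdefault(f - i, []).append(f)  ==  d[f-i] = d.get(f-i, []) + [f]
def pvBStep (d : PySem.Dict Int (List Int)) (p : Int × Int) : PySem.Dict Int (List Int) :=
  d.modify (p.2 - p.1) [] (fun g => g ++ [p.2])

def set_to_intervals_alt (frame_set : List Int) : List (List Int) :=
  let groups :=
    (PySem.List.enumerate (PySem.List.sorted frame_set (fun x => x) false)).foldl
      pvBStep PySem.Dict.empty
  -- g[0] / g[-1]: every group is nonempty, so headD/getLastD are exact here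
  groups.values.map (fun g => [g.headD 0, g.getLastD 0])

-- ===== PRECONDITION & SPEC =====
-- frame_set encodes a Python set, so its elements are distinct; Pre_ excludes lists with
-- duplicates, which encode no set (there A's per-element loop and B's grouping diverge).
def Pre_set_to_intervals (frame_set : List Int) : Prop := frame_set.Nodup
instance (frame_set : List Int) : Decidable (Pre_set_to_intervals frame_set) := by
  unfold Pre_set_to_intervals; infer_instance

def pvWitness_set_to_intervals : List Int := [3, 1, 2, 7, 10, 9]

def Spec_set_to_intervals (frame_set : List Int) (out : List (List Int)) : Prop := out = set_to_intervals_alt frame_set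
instance (frame_set : List Int) (out : List (List Int)) : Decidable (Spec_set_to_intervals frame_set out) := by unfold Spec_set_to_intervals; infer_instance

-- ===== CLAIM (what is proved, stated in full; the proofs are below) =====
def Claim_equal_set_to_intervals : Prop := ∀ (frame_set : List Int), Dom_set_to_intervals frame_set → Pre_set_to_intervals frame_set → Spec_set_to_intervals frame_set (set_to_intervals frame_set)

-- ===== LEMMAS AND PROOFS =====

-- A's loop only appends to its accumulator
lemma pvALoop_acc (intervals : List (List Int)) (start e : Int) (t : List Int) :
    pvALoop intervals start e t = intervals ++ pvALoop [] start e t := by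
  induction t generalizing intervals start e with
  | nil => simp [pvALoop]
  | cons f rest ih =>
    by_cases h : f = e + 1
    · have e1 : pvALoop intervals start e (f :: rest) = pvALoop intervals start f rest := by
        simp [pvALoop, h]
      have e2 : pvALoop [] start e (f :: rest) = pvALoop [] start f rest := by
        simp [pvALoop, h]
      rw [e1, e2, ih intervals]
    · have e1 : pvALoop intervals start e (f :: rest) = pvALoop (intervals ++ [[start, e]]) f f rest := by
        simp [pvALoop, h]
      have e2 : pvALoop [] start e (f :: rest) = pvALoop [[start, e]] f f rest := by
        simp [pvALoop, h]
      rw [e1, e2, ih (intervals ++ [[start, e]]), ih [[start, e]]]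
      simp

-- main invariant: folding B's step over the enumerated remainder, starting from a dict whose
-- last entry is the open run, produces exactly the closed intervals followed by A's loop output
lemma pvB_inv (t : List Int) : ∀ (j start e : Int) (prev : List (Int × List Int)) (run : List Int),
    List.Pairwise (· < ·) (e :: t) →
    (∀ p ∈ prev, p.1 < e - (j - 1)) →
    run.head? = some start → run.getLast? = some e →
    ((PySem.List.enumerate t j).foldl pvBStep
        (PySem.Dict.mk (prev ++ [(e - (j - 1), run)]))).items.map
        (fun p => [p.2.headD 0, p.2.getLastD 0])
      = prev.map (fun p => [p.2.headD 0, p.2.getLastD 0]) ++ pvALoop [] start e t := by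
  induction t with
  | nil =>
    intro j start e prev run _ _ hh hl
    simp [PySem.List.enumerate, pvALoop, List.headD_eq_head?_getD, List.getLastD_eq_getLast?,
      hh, hl]
  | cons f rest ih =>
    intro j start e prev run hch hprev hh hl
    have hef : e < f := (List.pairwise_cons.mp hch).1 f (by simp)
    have hch' : List.Pairwise (· < ·) (f :: rest) := (List.pairwise_cons.mp hch).2
    have hrne : run ≠ [] := by intro h; subst h; simp at hh
    rw [PySem.List.enumerate_cons, List.foldl_cons]
    by_cases hcase : f = e + 1
    · -- same key: the run's entry is extended in place
      have hkey : f - j = e - (j - 1) := by omega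
      have hfind : ∀ (l : List (Int × List Int)), (∀ p ∈ l, p.1 < e - (j - 1)) →
          List.find? (fun p => p.1 == f - j) (l ++ [(e - (j - 1), run)])
            = some (e - (j - 1), run) := by
        intro l hall
        induction l with
        | nil => simp [hkey]
        | cons a l ihl =>
          have ha : a.1 < e - (j - 1) := hall a (by simp)
          have hne : (a.1 == f - j) = false := by
            simp only [beq_eq_false_iff_ne]; omega
          simp only [List.cons_append, List.find?_cons, hne]
          exact ihl (fun p hp => hall p (by simp [hp]))
      have hany : ((prev ++ [(e - (j - 1), run)]).any (fun p => p.1 == f - j)) = true := by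
        rw [List.any_eq_true]
        exact ⟨(e - (j - 1), run), by simp, by simp [hkey]⟩
      have hstep : pvBStep (PySem.Dict.mk (prev ++ [(e - (j - 1), run)])) (j, f)
          = PySem.Dict.mk (prev ++ [(f - (j + 1 - 1), run ++ [f])]) := by
        simp only [pvBStep, PySem.Dict.modify, PySem.Dict.insert, PySem.Dict.getD,
          PySem.Dict.get?, PySem.Dict.contains]
        simp only [hfind prev hprev, Option.map_some, Option.getD_some, hany, if_true]
        congr 1
        have hmap : ∀ (l : List (Int × List Int)), (∀ p ∈ l, p.1 < e - (j - 1)) →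
            List.map (fun p => if (p.1 == f - j) = true then (f - j, run ++ [f]) else p)
              (l ++ [(e - (j - 1), run)]) = l ++ [(f - (j + 1 - 1), run ++ [f])] := by
          intro l hall
          induction l with
          | nil =>
            have hb : ((e - (j - 1)) == f - j) = true := by simp [hkey]
            simp only [List.nil_append, List.map_cons, List.map_nil, hb, if_true]
            have : f - j = f - (j + 1 - 1) := by omega
            rw [this]
          | cons a l ihl =>
            have ha : a.1 < e - (j - 1) := hall a (by simp)
            have hne : (a.1 == f - j) = false := by
              simp only [beq_eq_false_iff_ne]; omega
            simp only [List.cons_append, List.map_cons, hne]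
            rw [ihl (fun p hp => hall p (by simp [hp]))]
            simp
        exact hmap prev hprev
      rw [hstep]
      rw [ih (j + 1) start f prev (run ++ [f]) hch'
            (by intro p hp; have := hprev p hp; omega)
            (by cases run with
                | nil => exact absurd rfl hrne
                | cons a l => simp at hh ⊢; exact hh)
            (by simp : (run ++ [f]).getLast? = some f)]
      have : pvALoop [] start e (f :: rest) = pvALoop [] start f rest := by
        simp [pvALoop, hcase]
      rw [this]
    · -- new key: a fresh entry is appended at the end
      have hge : e + 2 ≤ f := by omega
      have hany : ((prev ++ [(e - (j - 1), run)]).any (fun p => p.1 == f - j)) = false := by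
        rw [List.any_eq_false]
        intro p hp
        rcases List.mem_append.mp hp with h | h
        · have := hprev p h
          simp only [beq_iff_eq]; omega
        · simp only [List.mem_singleton] at h
          subst h
          simp only [beq_iff_eq]; omega
      have hfind : List.find? (fun p => p.1 == f - j) (prev ++ [(e - (j - 1), run)])
          = none := by
        rw [List.find?_eq_none]
        intro p hp
        rcases List.mem_append.mp hp with h | h
        · have := hprev p h
          simp only [beq_iff_eq]; omega
        · simp only [List.mem_singleton] at h
          subst h
          simp only [beq_iff_eq]; omega
      have hstep : pvBStep (PySem.Dict.mk (prev ++ [(e - (j - 1), run)])) (j, f)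
          = PySem.Dict.mk ((prev ++ [(e - (j - 1), run)]) ++ [(f - (j + 1 - 1), [f])]) := by
        simp only [pvBStep, PySem.Dict.modify, PySem.Dict.insert, PySem.Dict.getD,
          PySem.Dict.get?, PySem.Dict.contains]
        simp only [hfind, hany, Option.map_none, Option.getD_none]
        norm_num
      rw [hstep]
      rw [ih (j + 1) f f (prev ++ [(e - (j - 1), run)]) [f] hch'
            (by intro p hp
                rcases List.mem_append.mp hp with h | h
                · have := hprev p h; omega
                · simp only [List.mem_singleton] at h; subst h; simp; omega)
            rfl rfl]
      have hA : pvALoop [] start e (f :: rest) = [[start, e]] ++ pvALoop [] f f rest := by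
        simp only [pvALoop, if_neg hcase]
        rw [pvALoop_acc]
        simp
      rw [hA]
      simp [List.headD_eq_head?_getD, List.getLastD_eq_getLast?, hh, hl]

-- ===== VERDICT (by name: the statement is the Claim_ definition above) =====
theorem set_to_intervals_spec : Claim_equal_set_to_intervals := by
  intro frame_set _ hpre
  unfold Spec_set_to_intervals set_to_intervals set_to_intervals_alt
  by_cases hnil : frame_set = []
  · subst hnil
    simp [PySem.List.sorted, PySem.Dict.empty, PySem.Dict.values]
  · have hperm := PySem.List.sorted_perm frame_set (fun x => x) false
    have hnd : (PySem.List.sorted frame_set (fun x => x) false).Nodup :=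
      hperm.nodup_iff.mpr hpre
    have hle : (PySem.List.sorted frame_set (fun x => x) false).Pairwise (fun a b => a ≤ b) :=
      PySem.List.sorted_pairwise frame_set (fun x => x)
    have hlt : (PySem.List.sorted frame_set (fun x => x) false).Pairwise (· < ·) :=
      (List.Pairwise.and hle hnd).imp (fun h => lt_of_le_of_ne h.1 h.2)
    cases hs : PySem.List.sorted frame_set (fun x => x) false with
    | nil =>
      refine absurd (List.length_eq_zero_iff.mp ?_) hnil
      rw [← hperm.length_eq, hs]
      rfl
    | cons f0 rest =>
      rw [hs] at hlt
      simp only [hnil, if_false]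
      rw [PySem.List.enumerate_cons, List.foldl_cons]
      have hstep0 : pvBStep PySem.Dict.empty (0, f0)
          = PySem.Dict.mk ([] ++ [(f0 - (1 - 1), [f0])]) := by
        simp [pvBStep, PySem.Dict.modify, PySem.Dict.insert, PySem.Dict.getD, PySem.Dict.get?,
          PySem.Dict.contains, PySem.Dict.empty]
      rw [show (0 : Int) + 1 = 1 from by norm_num, hstep0]
      have hmain := pvB_inv rest 1 f0 f0 [] [f0] hlt (by simp) rfl rfl
      simp only [PySem.Dict.values, List.map_map, Function.comp_def] at hmain ⊢
      rw [hmain]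
      simp
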